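-- pv_equiv track=rewrite | github.com/Mahnes/hayat-rpg | kerizkekle.py | generate_code
-- ===== SOURCE A (Python) =====
-- def generate_code(n):
--     chars = "abcdefghijklmnopqrstuvwxyz"
--     code = ""
--     temp_n = n
--     for _ in range(5):
--         code = chars[temp_n % 26] + code
--         temp_n //= 26
--     return code
-- ===== SOURCE B (Python) =====
-- def generate_code(n):
--     chars = "abcdefghijklmnopqrstuvwxyz"
--     return "".join(chars[(n // 26 ** i) % 26] for i in range(4, -1, -1))
-- ===== Notes on version B (the rewrite author's own statement) =====
-- stated objective: alternative
-- what changed: Replaces the accumulator loop that threads a running quotient and prepends characters with a direct per-position computation: digit i is (n // 26**i) % 26, joined left-to-right for i = 4..0.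
import Mathlib
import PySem

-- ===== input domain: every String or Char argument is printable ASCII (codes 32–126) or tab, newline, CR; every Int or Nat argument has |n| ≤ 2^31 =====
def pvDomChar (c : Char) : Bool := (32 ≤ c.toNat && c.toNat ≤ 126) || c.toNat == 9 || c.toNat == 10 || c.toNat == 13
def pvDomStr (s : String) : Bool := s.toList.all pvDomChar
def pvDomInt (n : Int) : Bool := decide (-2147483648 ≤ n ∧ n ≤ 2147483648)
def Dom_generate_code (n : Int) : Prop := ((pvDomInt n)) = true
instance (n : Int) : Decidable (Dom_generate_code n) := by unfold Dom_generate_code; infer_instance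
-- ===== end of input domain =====

-- B computes each of the five base-26 digits directly as (n // 26**i) % 26 instead of
-- threading a running quotient and prepending characters (alternative decomposition, same cost).


-- ===== PORT A =====
-- chars[temp_n % 26]: 0 ≤ temp_n % 26 < 26 (Python %, positive divisor), so the index is
-- always in range and getD's default is unreachable — the indexing is exact.
def generate_code (n : Int) : String :=
  let chars := "abcdefghijklmnopqrstuvwxyz".toList
  let st := (List.range 5).foldl
    (fun (st : List Char × Int) _ =>
      (chars.getD (PySem.Int.mod st.2 26).toNat 'a' :: st.1, PySem.Int.floordiv st.2 26))
    (([] : List Char), n)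
  String.mk st.1

-- ===== PORT B =====
-- chars[(n // 26**i) % 26]: the % 26 keeps the index in 0..25, getD's default is unreachable.
def generate_code_alt (n : Int) : String :=
  String.mk ((PySem.List.pyRange 4 (-1) (-1)).map
    (fun i =>
      "abcdefghijklmnopqrstuvwxyz".toList.getD
        (PySem.Int.mod (PySem.Int.floordiv n (26 ^ i.toNat)) 26).toNat 'a'))

-- ===== PRECONDITION & SPEC =====
def Spec_generate_code (n : Int) (out : String) : Prop := out = generate_code_alt n
instance (n : Int) (out : String) : Decidable (Spec_generate_code n out) := by unfold Spec_generate_code; infer_instance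

-- ===== CLAIM (what is proved, stated in full; the proofs are below) =====
def Claim_equal_generate_code : Prop := ∀ (n : Int), Dom_generate_code n → Spec_generate_code n (generate_code n)

-- ===== LEMMAS AND PROOFS =====

-- the nested quotient of A's loop equals B's direct power quotient
theorem fdiv_pow_succ (n : Int) (k : Nat) :
    PySem.Int.floordiv (PySem.Int.floordiv n (26 ^ k)) 26 = PySem.Int.floordiv n (26 ^ (k + 1)) := by
  rw [PySem.Int.floordiv_eq_ediv_of_pos (by positivity),
      PySem.Int.floordiv_eq_ediv_of_pos (by norm_num),
      PySem.Int.floordiv_eq_ediv_of_pos (by positivity),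
      Int.ediv_ediv_of_nonneg (by positivity), pow_succ]

theorem fdiv_pow_zero (n : Int) : PySem.Int.floordiv n (26 ^ 0) = n := by
  rw [pow_zero, PySem.Int.floordiv_eq_ediv_of_pos (by norm_num), Int.ediv_one]

-- ===== VERDICT (by name: the statement is the Claim_ definition above) =====
theorem generate_code_spec : Claim_equal_generate_code := by
  intro n _
  unfold Spec_generate_code generate_code generate_code_alt
  have hr : List.range 5 = [0, 1, 2, 3, 4] := rfl
  have hp : PySem.List.pyRange 4 (-1) (-1) = [4, 3, 2, 1, 0] := rfl
  simp only [hr, hp, List.foldl, List.map]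
  conv_lhs => rw [← fdiv_pow_zero n, fdiv_pow_succ, fdiv_pow_succ, fdiv_pow_succ, fdiv_pow_succ]
  norm_num [fdiv_pow_zero, show Int.toNat 4 = 4 from rfl, show Int.toNat 3 = 3 from rfl, show Int.toNat 2 = 2 from rfl]
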